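-- pv_equiv track=rewrite | github.com/ben-d-t/ben-d-t.github.io | adventofcode2023/day18/main.py | construct_dig_site
-- ===== SOURCE A (Python) =====
-- def construct_dig_site(instructions):
--     grid = {}
--     x = y = 0
--
--     # Apply instructions
--     for direction, distance, _ in instructions:
--         for _ in range(distance):
--             grid[(x, y)] = '#'
--             if direction == 'U':
--                 y -= 1
--             elif direction == 'D':
--                 y += 1
--             elif direction == 'L':
--                 x -= 1
--             elif direction == 'R':
--                 x += 1
--
--     min_x = min(x for x, _ in grid.keys())
--     max_x = max(x for x, _ in grid.keys())
--     min_y = min(y for _, y in grid.keys())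
--     max_y = max(y for _, y in grid.keys())
--
--     # Create a grid representation
--     grid_representation = [['.' for _ in range(min_x, max_x + 1)] for _ in range(min_y, max_y + 1)]
--     for (x, y), value in grid.items():
--         grid_representation[y - min_y][x - min_x] = value
--
--     return grid_representation
-- ===== SOURCE B (Python) =====
-- # B: two-pass re-implementation — no dict of cells: pass 1 walks the instructions
-- # tracking running bounds, pass 2 re-walks and writes '#' straight into the rows.
-- _DELTA = {'U': (0, -1), 'D': (0, 1), 'L': (-1, 0), 'R': (1, 0)}
--
--
-- def construct_dig_site(instructions):
--     # pass 1: running bounding box over every cell visited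
--     x = y = 0
--     bounds = None
--     for direction, distance, _ in instructions:
--         dx, dy = _DELTA.get(direction, (0, 0))
--         for _ in range(distance):
--             if bounds is None:
--                 bounds = (x, x, y, y)
--             else:
--                 mnx, mxx, mny, mxy = bounds
--                 bounds = (min(mnx, x), max(mxx, x), min(mny, y), max(mxy, y))
--             x += dx
--             y += dy
--     if bounds is None:
--         raise ValueError('construct_dig_site: no cells dug')
--     min_x, max_x, min_y, max_y = bounds
--     rows = [['.'] * (max_x - min_x + 1) for _ in range(max_y - min_y + 1)]
--     # pass 2: mark the visited cells directly
--     x = y = 0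
--     for direction, distance, _ in instructions:
--         dx, dy = _DELTA.get(direction, (0, 0))
--         for _ in range(distance):
--             rows[y - min_y][x - min_x] = '#'
--             x += dx
--             y += dy
--     return rows
-- ===== Notes on version B (the rewrite author's own statement) =====
-- stated objective: alternative
-- what changed: B replaces A's dict-of-cells (build a hash map of every dug cell, take min/max over its keys, then re-paint from dict.items) by two direct walks over the instructions: pass 1 tracks a running bounding box, pass 2 writes '#' straight into the allocated rows; no per-cell dictionary exists.
import Mathlib
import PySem

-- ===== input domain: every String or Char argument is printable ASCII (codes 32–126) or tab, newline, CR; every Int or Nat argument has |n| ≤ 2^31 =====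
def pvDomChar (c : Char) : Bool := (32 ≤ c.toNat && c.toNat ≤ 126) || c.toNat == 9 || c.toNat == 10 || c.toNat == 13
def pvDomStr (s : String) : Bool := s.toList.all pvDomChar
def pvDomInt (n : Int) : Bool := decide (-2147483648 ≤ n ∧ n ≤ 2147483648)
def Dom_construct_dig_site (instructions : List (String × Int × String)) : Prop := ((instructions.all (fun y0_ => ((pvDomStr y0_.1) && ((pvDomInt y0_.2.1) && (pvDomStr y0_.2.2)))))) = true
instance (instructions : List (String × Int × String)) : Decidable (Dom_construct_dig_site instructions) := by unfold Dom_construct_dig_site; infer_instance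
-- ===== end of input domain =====

-- B replaces A's dict-of-dug-cells by two direct walks (running bounding box, then
-- painting rows in place); equivalence of the returned grids is proved on Pre_ (some
-- instruction has a positive distance; otherwise the Python A raises ValueError).


-- ===== PORT A =====
def construct_dig_site (instructions : List (String × Int × String)) : List (List String) :=
  let st := instructions.foldl
    (fun (st : (Int × Int) × PySem.Dict (Int × Int) String) ins =>
      (PySem.List.pyRange 0 ins.2.1 1).foldl
        (fun st _ =>
          let g := st.2.insert (st.1.1, st.1.2) "#"
          if ins.1 == "U" then ((st.1.1, st.1.2 - 1), g)
          else if ins.1 == "D" then ((st.1.1, st.1.2 + 1), g)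
          else if ins.1 == "L" then ((st.1.1 - 1, st.1.2), g)
          else if ins.1 == "R" then ((st.1.1 + 1, st.1.2), g)
          else ((st.1.1, st.1.2), g)) st)
    ((0, 0), PySem.Dict.empty)
  let grid := st.2
  -- min()/max() over the key generators; Python raises ValueError on an empty dict — excluded by Pre_
  let min_x := (PySem.List.min? (grid.keys.map (fun k => k.1)) (fun v => v)).getD 0
  let max_x := (PySem.List.max? (grid.keys.map (fun k => k.1)) (fun v => v)).getD 0
  let min_y := (PySem.List.min? (grid.keys.map (fun k => k.2)) (fun v => v)).getD 0
  let max_y := (PySem.List.max? (grid.keys.map (fun k => k.2)) (fun v => v)).getD 0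
  let rep := (PySem.List.pyRange min_y (max_y + 1) 1).map
      (fun _ => (PySem.List.pyRange min_x (max_x + 1) 1).map (fun _ => "."))
  grid.items.foldl
    (fun rep q =>
      PySem.List.pySetD rep (q.1.2 - min_y)
        (PySem.List.pySetD (PySem.List.pyGetD rep (q.1.2 - min_y) []) (q.1.1 - min_x) q.2))
    rep

-- ===== PORT B =====
def pvDelta : PySem.Dict String (Int × Int) :=
  PySem.Dict.ofList [("U", (0, -1)), ("D", (0, 1)), ("L", (-1, 0)), ("R", (1, 0))]

def construct_dig_site_alt (instructions : List (String × Int × String)) : List (List String) :=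
  let p1 := instructions.foldl
    (fun (st : (Int × Int) × Option (Int × Int × Int × Int)) ins =>
      let dd := pvDelta.getD ins.1 (0, 0)
      (PySem.List.pyRange 0 ins.2.1 1).foldl
        (fun st _ =>
          let b := match st.2 with
            | none => (st.1.1, st.1.1, st.1.2, st.1.2)
            | some m => (min m.1 st.1.1, max m.2.1 st.1.1, min m.2.2.1 st.1.2, max m.2.2.2 st.1.2)
          ((st.1.1 + dd.1, st.1.2 + dd.2), some b)) st)
    ((0, 0), none)
  match p1.2 with
  | none => []   -- the Python raises ValueError here (excluded by Pre_)
  | some m =>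
    let min_x := m.1; let max_x := m.2.1; let min_y := m.2.2.1; let max_y := m.2.2.2
    let rows := (PySem.List.pyRange 0 (max_y - min_y + 1) 1).map
        (fun _ => PySem.List.pyRepeat ["."] (max_x - min_x + 1))
    let p2 := instructions.foldl
      (fun (st : (Int × Int) × List (List String)) ins =>
        let dd := pvDelta.getD ins.1 (0, 0)
        (PySem.List.pyRange 0 ins.2.1 1).foldl
          (fun st _ =>
            let rows := PySem.List.pySetD st.2 (st.1.2 - min_y)
              (PySem.List.pySetD (PySem.List.pyGetD st.2 (st.1.2 - min_y) []) (st.1.1 - min_x) "#")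
            ((st.1.1 + dd.1, st.1.2 + dd.2), rows)) st)
      ((0, 0), rows)
    p2.2

-- ===== PRECONDITION & SPEC =====
-- Pre_ excludes exactly the inputs where no cell is ever dug (every distance ≤ 0):
-- there Python A (and B) raise ValueError on min() of an empty sequence.
def Pre_construct_dig_site (instructions : List (String × Int × String)) : Prop :=
  (instructions.any (fun i => decide (0 < i.2.1))) = true
instance (instructions : List (String × Int × String)) : Decidable (Pre_construct_dig_site instructions) := by
  unfold Pre_construct_dig_site; infer_instance

def pvWitness_construct_dig_site : (List (String × Int × String)) :=
  [("R", 2, "a"), ("D", 2, "b"), ("L", 2, "c"), ("U", 2, "d")]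

def Spec_construct_dig_site (instructions : List (String × Int × String)) (out : List (List String)) : Prop := out = construct_dig_site_alt instructions
instance (instructions : List (String × Int × String)) (out : List (List String)) : Decidable (Spec_construct_dig_site instructions out) := by unfold Spec_construct_dig_site; infer_instance

-- ===== CLAIM (what is proved, stated in full; the proofs are below) =====
def Claim_equal_construct_dig_site : Prop := ∀ (instructions : List (String × Int × String)), Dom_construct_dig_site instructions → Pre_construct_dig_site instructions → Spec_construct_dig_site instructions (construct_dig_site instructions)

-- ===== LEMMAS AND PROOFS =====

-- the common simulation: position step, cells visited by one instruction, by all instructions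
def pvStep (d : String) (p : Int × Int) : Int × Int :=
  if d == "U" then (p.1, p.2 - 1)
  else if d == "D" then (p.1, p.2 + 1)
  else if d == "L" then (p.1 - 1, p.2)
  else if d == "R" then (p.1 + 1, p.2)
  else p

def pvWalk (d : String) : Nat → (Int × Int) → List (Int × Int)
  | 0, _ => []
  | k + 1, p => p :: pvWalk d k (pvStep d p)

def pvEnd (d : String) : Nat → (Int × Int) → Int × Int
  | 0, p => p
  | k + 1, p => pvEnd d k (pvStep d p)

def pvTrail : List (String × Int × String) → (Int × Int) → List (Int × Int)
  | [], _ => []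
  | i :: r, p => pvWalk i.1 i.2.1.toNat p ++ pvTrail r (pvEnd i.1 i.2.1.toNat p)

def pvEndTrail : List (String × Int × String) → (Int × Int) → Int × Int
  | [], p => p
  | i :: r, p => pvEndTrail r (pvEnd i.1 i.2.1.toNat p)

-- a visit-then-move loop body, iterated over an ignored list, is a fold over the walk
lemma pv_visit_fold {α : Type} (d : String) (f : α → (Int × Int) → α) :
    ∀ (l : List Int) (p : Int × Int) (a : α),
      l.foldl (fun st _ => (pvStep d st.1, f st.2 st.1)) (p, a)
        = (pvEnd d l.length p, (pvWalk d l.length p).foldl f a) := by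
  intro l
  induction l with
  | nil => intro p a; simp [pvWalk, pvEnd]
  | cons z l ih => intro p a; simp [List.foldl_cons, pvWalk, pvEnd, ih]

lemma pv_instr_fold {α : Type} (f : α → (Int × Int) → α)
    (body : (String × Int × String) → ((Int × Int) × α) → Int → ((Int × Int) × α))
    (hbody : ∀ i st z, body i st z = (pvStep i.1 st.1, f st.2 st.1)) :
    ∀ (ins : List (String × Int × String)) (p : Int × Int) (a : α),
      ins.foldl (fun st i => (PySem.List.pyRange 0 i.2.1 1).foldl (body i) st) (p, a)
        = (pvEndTrail ins p, (pvTrail ins p).foldl f a) := by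
  intro ins
  induction ins with
  | nil => intro p a; simp [pvTrail, pvEndTrail]
  | cons i r ih =>
    intro p a
    have hb : body i = fun st _ => (pvStep i.1 st.1, f st.2 st.1) := by
      funext st z; exact hbody i st z
    have hlen : (PySem.List.pyRange 0 i.2.1 1).length = i.2.1.toNat := by
      simp [PySem.List.length_pyRange_one]
    simp only [List.foldl_cons, hb, pv_visit_fold, hlen, ih, pvTrail, pvEndTrail,
      List.foldl_append]

-- B's delta lookup moves like pvStep
lemma pv_delta_step (d : String) (p : Int × Int) :
    (p.1 + (pvDelta.getD d (0, 0)).1, p.2 + (pvDelta.getD d (0, 0)).2) = pvStep d p := by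
  have hd : pvDelta = PySem.Dict.mk [("U", (0, -1)), ("D", (0, 1)), ("L", (-1, 0)), ("R", (1, 0))] := by
    decide
  by_cases h1 : d = "U"
  · subst h1
    have : pvDelta.getD "U" (0, 0) = (0, -1) := by decide
    rw [this]; simp [pvStep]; omega
  · by_cases h2 : d = "D"
    · subst h2
      have : pvDelta.getD "D" (0, 0) = (0, 1) := by decide
      rw [this]; simp [pvStep]
    · by_cases h3 : d = "L"
      · subst h3
        have : pvDelta.getD "L" (0, 0) = (-1, 0) := by decide
        rw [this]; simp [pvStep]; omega
      · by_cases h4 : d = "R"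
        · subst h4
          have : pvDelta.getD "R" (0, 0) = (1, 0) := by decide
          rw [this]; simp [pvStep]
        · have : pvDelta.getD d (0, 0) = (0, 0) := by
            simp [hd, PySem.Dict.getD, PySem.Dict.get?,
              Ne.symm h1, Ne.symm h2, Ne.symm h3, Ne.symm h4]
          rw [this]; simp [pvStep, h1, h2, h3, h4]


-- B's bounding-box update, and its always-some form
def pvUpdB : Option (Int × Int × Int × Int) → (Int × Int) → Option (Int × Int × Int × Int) :=
  fun b p => some (match b with
    | none => (p.1, p.1, p.2, p.2)
    | some m => (min m.1 p.1, max m.2.1 p.1, min m.2.2.1 p.2, max m.2.2.2 p.2))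

def pvUpdS : (Int × Int × Int × Int) → (Int × Int) → (Int × Int × Int × Int) :=
  fun m p => (min m.1 p.1, max m.2.1 p.1, min m.2.2.1 p.2, max m.2.2.2 p.2)

lemma pv_updB_some : ∀ (t : List (Int × Int)) (m : Int × Int × Int × Int),
    t.foldl pvUpdB (some m) = some (t.foldl pvUpdS m) := by
  intro t
  induction t with
  | nil => intro m; rfl
  | cons p t ih => intro m; simp [List.foldl_cons, pvUpdB, pvUpdS, ih]

lemma pv_updS_components : ∀ (t : List (Int × Int)) (m : Int × Int × Int × Int),
    t.foldl pvUpdS m = ((t.map (fun q => q.1)).foldl min m.1,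
      (t.map (fun q => q.1)).foldl max m.2.1,
      (t.map (fun q => q.2)).foldl min m.2.2.1,
      (t.map (fun q => q.2)).foldl max m.2.2.2) := by
  intro t
  induction t with
  | nil => intro m; rfl
  | cons p t ih => intro m; simp [List.foldl_cons, pvUpdS, ih]

-- the minimum / maximum of two lists with the same members agree
lemma pv_min_eq {l₁ l₂ : List Int} (hmem : ∀ x, x ∈ l₁ ↔ x ∈ l₂) {a b : Int}
    (ha : a ∈ l₁) (hal : ∀ y ∈ l₁, a ≤ y) (hb : b ∈ l₂) (hbl : ∀ y ∈ l₂, b ≤ y) : a = b :=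
  le_antisymm (hal b ((hmem b).mpr hb)) (hbl a ((hmem a).mp ha))

lemma pv_max_eq {l₁ l₂ : List Int} (hmem : ∀ x, x ∈ l₁ ↔ x ∈ l₂) {a b : Int}
    (ha : a ∈ l₁) (hal : ∀ y ∈ l₁, y ≤ a) (hb : b ∈ l₂) (hbl : ∀ y ∈ l₂, y ≤ b) : a = b :=
  le_antisymm (hbl a ((hmem a).mp ha)) (hal b ((hmem b).mpr hb))

-- every value ever stored in A's dict is "#"
lemma pv_items_hash : ∀ (l : List (Int × Int)) (d : PySem.Dict (Int × Int) String),
    (∀ q ∈ d.items, q.2 = "#") →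
    ∀ q ∈ (l.foldl (fun g p => g.insert p "#") d).items, q.2 = "#" := by
  intro l
  induction l with
  | nil => intro d h; exact h
  | cons x t ih =>
    intro d h
    refine ih (d.insert x "#") ?_
    intro q hq
    rcases (PySem.Dict.mem_items_insert d x "#" q).mp hq with h1 | h2
    · rw [h1]
    · exact h q h2.1

-- canonical grid picture and the cell-marking step
def pvGrid (mnx mny : Int) (H W : Nat) (P : Int × Int → Bool) : List (List String) :=
  (List.range H).map (fun i : Nat => (List.range W).map (fun j : Nat =>
    if P (mnx + (j : Int), mny + (i : Int)) then "#" else "."))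

def pvMark (mnx mny : Int) (rep : List (List String)) (q : Int × Int) : List (List String) :=
  PySem.List.pySetD rep (q.2 - mny)
    (PySem.List.pySetD (PySem.List.pyGetD rep (q.2 - mny) []) (q.1 - mnx) "#")

lemma pvGrid_congr {mnx mny : Int} {H W : Nat} {P Q : Int × Int → Bool}
    (h : ∀ r, P r = Q r) : pvGrid mnx mny H W P = pvGrid mnx mny H W Q := by
  have : P = Q := funext h
  rw [this]

lemma pvMark_grid {mnx mny : Int} {H W : Nat} {P : Int × Int → Bool} {q : Int × Int}
    (hx0 : 0 ≤ q.1 - mnx) (hxW : q.1 - mnx < (W : Int))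
    (hy0 : 0 ≤ q.2 - mny) (hyH : q.2 - mny < (H : Int)) :
    pvMark mnx mny (pvGrid mnx mny H W P) q
      = pvGrid mnx mny H W (fun r => r == q || P r) := by
  have hq1 : ((q.1 - mnx).toNat : Int) = q.1 - mnx := Int.toNat_of_nonneg hx0
  have hq2 : ((q.2 - mny).toNat : Int) = q.2 - mny := Int.toNat_of_nonneg hy0
  have hWq : (q.1 - mnx).toNat < W := by omega
  have hHq : (q.2 - mny).toNat < H := by omega
  unfold pvMark
  rw [PySem.List.pySetD_of_nonneg _ _ hy0, PySem.List.pySetD_of_nonneg _ _ hx0,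
    PySem.List.pyGetD_of_nonneg _ _ hy0]
  have hlen : (pvGrid mnx mny H W P).length = H := by
    simp only [pvGrid, List.length_map, List.length_range]
  have hrow : (pvGrid mnx mny H W P).getD (q.2 - mny).toNat []
      = (List.range W).map (fun j : Nat => if P (mnx + (j : Int), mny + (((q.2 - mny).toNat : Nat) : Int)) then "#" else ".") := by
    rw [List.getD_eq_getElem _ _ (by rw [hlen]; exact hHq)]
    simp only [pvGrid, List.getElem_map, List.getElem_range]
  rw [hrow]
  apply List.ext_getElem
  · simp only [pvGrid, List.length_set, List.length_map, List.length_range]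
  · intro i h1 h2
    simp only [pvGrid, List.length_set, List.length_map, List.length_range] at h1 h2
    rw [List.getElem_set]
    by_cases hii : (q.2 - mny).toNat = i
    · subst hii
      rw [if_pos rfl]
      apply List.ext_getElem
      · simp only [pvGrid, List.length_set, List.length_map, List.length_range,
          List.getElem_map, List.getElem_range]
      · intro j hj1 hj2
        simp only [List.length_set, List.length_map, List.length_range] at hj1
        rw [List.getElem_set]
        simp only [pvGrid, List.getElem_map, List.getElem_range]
        by_cases hjj : (q.1 - mnx).toNat = j
        · subst hjj
          rw [if_pos rfl]
          have hpt : ((mnx + (((q.1 - mnx).toNat : Nat) : Int), mny + (((q.2 - mny).toNat : Nat) : Int)) : Int × Int) = q := by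
            rw [Prod.ext_iff]
            constructor <;> simp <;> omega
          rw [hpt]
          simp
        · rw [if_neg hjj]
          have hne : ((mnx + ((j : Nat) : Int), mny + (((q.2 - mny).toNat : Nat) : Int)) : Int × Int) ≠ q := by
            intro hcon
            have := congrArg Prod.fst hcon
            simp at this
            omega
          have hbeq : (((mnx + ((j : Nat) : Int), mny + (((q.2 - mny).toNat : Nat) : Int)) : Int × Int) == q) = false := by
            simp only [beq_eq_false_iff_ne, ne_eq]
            exact hne
          rw [hbeq, Bool.false_or]
    · rw [if_neg hii]
      simp only [pvGrid, List.getElem_map, List.getElem_range]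
      refine List.map_congr_left ?_
      intro j hj
      have hne : ((mnx + ((j : Nat) : Int), mny + ((i : Nat) : Int)) : Int × Int) ≠ q := by
        intro hcon
        have := congrArg Prod.snd hcon
        simp at this
        omega
      have hbeq : (((mnx + ((j : Nat) : Int), mny + ((i : Nat) : Int)) : Int × Int) == q) = false := by
        simp only [beq_eq_false_iff_ne, ne_eq]
        exact hne
      rw [hbeq, Bool.false_or]

lemma pv_foldl_mark (mnx mny : Int) (H W : Nat) :
    ∀ (l : List (Int × Int)) (P : Int × Int → Bool),
      (∀ p ∈ l, 0 ≤ p.1 - mnx ∧ p.1 - mnx < (W : Int) ∧ 0 ≤ p.2 - mny ∧ p.2 - mny < (H : Int)) →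
      l.foldl (pvMark mnx mny) (pvGrid mnx mny H W P)
        = pvGrid mnx mny H W (fun r => decide (r ∈ l) || P r) := by
  intro l
  induction l with
  | nil =>
    intro P _
    simp only [List.foldl_nil]
    exact pvGrid_congr (by intro r; simp)
  | cons p t ih =>
    intro P hb
    have hp := hb p (by simp)
    rw [List.foldl_cons, pvMark_grid hp.1 hp.2.1 hp.2.2.1 hp.2.2.2,
      ih _ (fun x hx => hb x (by simp [hx]))]
    refine pvGrid_congr ?_
    intro r
    by_cases hr : r = p
    · simp [hr]
    · by_cases hrt : r ∈ t <;> simp [hr, hrt]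

-- a trail is nonempty as soon as one distance is positive
lemma pv_trail_ne : ∀ (ins : List (String × Int × String)) (p : Int × Int),
    (ins.any (fun i => decide (0 < i.2.1))) = true → pvTrail ins p ≠ [] := by
  intro ins
  induction ins with
  | nil => intro p h; simp at h
  | cons i r ih =>
    intro p h
    by_cases hi : 0 < i.2.1
    · obtain ⟨k, hk⟩ : ∃ k, i.2.1.toNat = k + 1 := ⟨i.2.1.toNat - 1, by omega⟩
      simp [pvTrail, hk, pvWalk]
    · simp only [List.any_cons, Bool.or_eq_true, decide_eq_true_eq] at h
      rcases h with h | h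
      · omega
      · simp only [pvTrail]
        intro hcon
        rcases List.append_eq_nil_iff.mp hcon with ⟨_, h2⟩
        exact ih _ h h2


-- the three loops of the two ports, reshaped as folds over the trail
lemma pv_A_fold (ins : List (String × Int × String)) (p : Int × Int)
    (g : PySem.Dict (Int × Int) String) :
    ins.foldl
      (fun (st : (Int × Int) × PySem.Dict (Int × Int) String) i =>
        (PySem.List.pyRange 0 i.2.1 1).foldl
          (fun st _ =>
            let gg := st.2.insert (st.1.1, st.1.2) "#"
            if i.1 == "U" then ((st.1.1, st.1.2 - 1), gg)
            else if i.1 == "D" then ((st.1.1, st.1.2 + 1), gg)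
            else if i.1 == "L" then ((st.1.1 - 1, st.1.2), gg)
            else if i.1 == "R" then ((st.1.1 + 1, st.1.2), gg)
            else ((st.1.1, st.1.2), gg)) st) (p, g)
    = (pvEndTrail ins p, (pvTrail ins p).foldl (fun g q => g.insert q "#") g) := by
  refine pv_instr_fold (fun g q => g.insert q "#") _ ?_ ins p g
  intro i st z
  simp only [pvStep]
  split_ifs <;> simp_all

lemma pv_B1_fold (ins : List (String × Int × String)) (p : Int × Int)
    (b : Option (Int × Int × Int × Int)) :
    ins.foldl
      (fun (st : (Int × Int) × Option (Int × Int × Int × Int)) i =>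
        let dd := pvDelta.getD i.1 (0, 0)
        (PySem.List.pyRange 0 i.2.1 1).foldl
          (fun st _ =>
            let bb := match st.2 with
              | none => (st.1.1, st.1.1, st.1.2, st.1.2)
              | some m => (min m.1 st.1.1, max m.2.1 st.1.1, min m.2.2.1 st.1.2, max m.2.2.2 st.1.2)
            ((st.1.1 + dd.1, st.1.2 + dd.2), some bb)) st) (p, b)
    = (pvEndTrail ins p, (pvTrail ins p).foldl pvUpdB b) := by
  refine pv_instr_fold pvUpdB _ ?_ ins p b
  intro i st z
  show ((st.1.1 + (pvDelta.getD i.1 (0, 0)).1, st.1.2 + (pvDelta.getD i.1 (0, 0)).2), _)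
      = (pvStep i.1 st.1, pvUpdB st.2 st.1)
  rw [Prod.ext_iff]
  exact ⟨pv_delta_step i.1 st.1, rfl⟩

lemma pv_B2_fold (mnx mny : Int) (ins : List (String × Int × String)) (p : Int × Int)
    (rows : List (List String)) :
    ins.foldl
      (fun (st : (Int × Int) × List (List String)) i =>
        let dd := pvDelta.getD i.1 (0, 0)
        (PySem.List.pyRange 0 i.2.1 1).foldl
          (fun st _ =>
            let rr := PySem.List.pySetD st.2 (st.1.2 - mny)
              (PySem.List.pySetD (PySem.List.pyGetD st.2 (st.1.2 - mny) []) (st.1.1 - mnx) "#")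
            ((st.1.1 + dd.1, st.1.2 + dd.2), rr)) st) (p, rows)
    = (pvEndTrail ins p, (pvTrail ins p).foldl (pvMark mnx mny) rows) := by
  refine pv_instr_fold (pvMark mnx mny) _ ?_ ins p rows
  intro i st z
  show ((st.1.1 + (pvDelta.getD i.1 (0, 0)).1, st.1.2 + (pvDelta.getD i.1 (0, 0)).2), _)
      = (pvStep i.1 st.1, pvMark mnx mny st.2 st.1)
  rw [Prod.ext_iff]
  exact ⟨pv_delta_step i.1 st.1, rfl⟩

lemma pvGrid_false (mnx mny : Int) (H W : Nat) :
    pvGrid mnx mny H W (fun _ => false) = List.replicate H (List.replicate W ".") := by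
  simp [pvGrid, List.map_const']


-- value of Python min()/max() with no key, as "member and bound"
lemma pv_minD_spec (xs : List Int) (hne : xs ≠ []) :
    ((PySem.List.min? xs (fun v => v)).getD 0) ∈ xs
      ∧ ∀ y ∈ xs, ((PySem.List.min? xs (fun v => v)).getD 0) ≤ y := by
  cases h : PySem.List.min? xs (fun v => v) with
  | none => exact absurd ((PySem.List.min?_eq_none_iff _ _).mp h) hne
  | some m =>
    refine ⟨by simpa using PySem.List.min?_mem h, ?_⟩
    intro y hy
    simpa using PySem.List.min?_isMin h y hy

lemma pv_maxD_spec (xs : List Int) (hne : xs ≠ []) :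
    ((PySem.List.max? xs (fun v => v)).getD 0) ∈ xs
      ∧ ∀ y ∈ xs, y ≤ ((PySem.List.max? xs (fun v => v)).getD 0) := by
  cases h : PySem.List.max? xs (fun v => v) with
  | none => exact absurd ((PySem.List.max?_eq_none_iff _ _).mp h) hne
  | some m =>
    refine ⟨by simpa using PySem.List.max?_mem h, ?_⟩
    intro y hy
    simpa using PySem.List.max?_isMax h y hy

-- ===== VERDICT (by name: the statement is the Claim_ definition above) =====
theorem construct_dig_site_spec : Claim_equal_construct_dig_site := by
  intro ins _ hpre
  unfold Spec_construct_dig_site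
  have hTne := pv_trail_ne ins (0, 0) hpre
  obtain ⟨p, t, hT⟩ := List.exists_cons_of_ne_nil hTne
  -- B's running bounds over the trail
  set nx := (t.map (fun q => q.1)).foldl min p.1 with hnx
  set xx := (t.map (fun q => q.1)).foldl max p.1 with hxx
  set ny := (t.map (fun q => q.2)).foldl min p.2 with hny
  set xy := (t.map (fun q => q.2)).foldl max p.2 with hxy
  have hBB : (pvTrail ins (0, 0)).foldl pvUpdB none = some (nx, xx, ny, xy) := by
    rw [hT, List.foldl_cons]
    show t.foldl pvUpdB (some (p.1, p.1, p.2, p.2)) = _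
    rw [pv_updB_some, pv_updS_components]
  -- membership and bound facts for the four running extrema
  have hnx_mem : nx ∈ (pvTrail ins (0, 0)).map (fun q => q.1) := by
    rw [hT, List.map_cons]
    rcases PySem.List.foldl_min_mem (t.map (fun q => q.1)) p.1 with h | h
    · rw [hnx, h]; exact List.mem_cons_self
    · exact List.mem_cons_of_mem _ h
  have hxx_mem : xx ∈ (pvTrail ins (0, 0)).map (fun q => q.1) := by
    rw [hT, List.map_cons]
    rcases PySem.List.foldl_max_mem (t.map (fun q => q.1)) p.1 with h | h
    · rw [hxx, h]; exact List.mem_cons_self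
    · exact List.mem_cons_of_mem _ h
  have hny_mem : ny ∈ (pvTrail ins (0, 0)).map (fun q => q.2) := by
    rw [hT, List.map_cons]
    rcases PySem.List.foldl_min_mem (t.map (fun q => q.2)) p.2 with h | h
    · rw [hny, h]; exact List.mem_cons_self
    · exact List.mem_cons_of_mem _ h
  have hxy_mem : xy ∈ (pvTrail ins (0, 0)).map (fun q => q.2) := by
    rw [hT, List.map_cons]
    rcases PySem.List.foldl_max_mem (t.map (fun q => q.2)) p.2 with h | h
    · rw [hxy, h]; exact List.mem_cons_self
    · exact List.mem_cons_of_mem _ h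
  have hnx_min : ∀ y ∈ (pvTrail ins (0, 0)).map (fun q => q.1), nx ≤ y := by
    rw [hT, List.map_cons]
    intro y hy
    rcases List.mem_cons.mp hy with h | h
    · rw [h]; exact (PySem.List.foldl_min_le _ _).1
    · exact (PySem.List.foldl_min_le _ _).2 y h
  have hxx_max : ∀ y ∈ (pvTrail ins (0, 0)).map (fun q => q.1), y ≤ xx := by
    rw [hT, List.map_cons]
    intro y hy
    rcases List.mem_cons.mp hy with h | h
    · rw [h]; exact (PySem.List.le_foldl_max _ _).1
    · exact (PySem.List.le_foldl_max _ _).2 y h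
  have hny_min : ∀ y ∈ (pvTrail ins (0, 0)).map (fun q => q.2), ny ≤ y := by
    rw [hT, List.map_cons]
    intro y hy
    rcases List.mem_cons.mp hy with h | h
    · rw [h]; exact (PySem.List.foldl_min_le _ _).1
    · exact (PySem.List.foldl_min_le _ _).2 y h
  have hxy_max : ∀ y ∈ (pvTrail ins (0, 0)).map (fun q => q.2), y ≤ xy := by
    rw [hT, List.map_cons]
    intro y hy
    rcases List.mem_cons.mp hy with h | h
    · rw [h]; exact (PySem.List.le_foldl_max _ _).1
    · exact (PySem.List.le_foldl_max _ _).2 y h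
  -- A's dict of dug cells
  set G := (pvTrail ins (0, 0)).foldl (fun g q => g.insert q "#") PySem.Dict.empty with hG
  have hkeys : G.keys = PySem.Set.ofList (pvTrail ins (0, 0)) := by
    rw [hG]
    have := PySem.Dict.keys_foldl_insert (pvTrail ins (0, 0))
      (fun _ _ => "#") (PySem.Dict.empty (κ := Int × Int) (ν := String))
    simpa [PySem.Dict.keys_empty, PySem.Set.update_empty] using this
  have hnod : G.keys.Nodup := by
    rw [hkeys]; exact PySem.Set.nodup_ofList _
  have hmemk : ∀ r, r ∈ G.keys ↔ r ∈ pvTrail ins (0, 0) := by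
    intro r; rw [hkeys]; exact PySem.Set.mem_ofList _ _
  have hval : ∀ q ∈ G.items, q.2 = "#" := by
    rw [hG]
    exact pv_items_hash _ _ (by simp [PySem.Dict.empty])
  have hgetD : ∀ k, G.getD k "#" = "#" := by
    intro k
    cases hg : G.get? k with
    | none => exact PySem.Dict.getD_of_get?_eq_none G "#" hg
    | some v =>
      rw [PySem.Dict.getD_of_get?_eq_some G "#" hg]
      exact hval (k, v) (PySem.Dict.mem_items_of_get?_eq_some G hg)
  have hkne : G.keys ≠ [] := by
    refine List.ne_nil_of_mem ((hmemk p).mpr ?_)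
    rw [hT]; exact List.mem_cons_self
  have hmemmap1 : ∀ x, x ∈ G.keys.map (fun k => k.1) ↔ x ∈ (pvTrail ins (0, 0)).map (fun q => q.1) := by
    intro x
    simp only [List.mem_map]
    exact ⟨fun ⟨k, hk, e⟩ => ⟨k, (hmemk k).mp hk, e⟩, fun ⟨k, hk, e⟩ => ⟨k, (hmemk k).mpr hk, e⟩⟩
  have hmemmap2 : ∀ x, x ∈ G.keys.map (fun k => k.2) ↔ x ∈ (pvTrail ins (0, 0)).map (fun q => q.2) := by
    intro x
    simp only [List.mem_map]
    exact ⟨fun ⟨k, hk, e⟩ => ⟨k, (hmemk k).mp hk, e⟩, fun ⟨k, hk, e⟩ => ⟨k, (hmemk k).mpr hk, e⟩⟩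
  have hmapne1 : G.keys.map (fun k => k.1) ≠ [] := by
    simpa [List.map_eq_nil_iff] using hkne
  have hmapne2 : G.keys.map (fun k => k.2) ≠ [] := by
    simpa [List.map_eq_nil_iff] using hkne
  -- A's four extrema equal B's
  obtain ⟨hAnx_mem, hAnx_min⟩ := pv_minD_spec (G.keys.map (fun k => k.1)) hmapne1
  obtain ⟨hAxx_mem, hAxx_max⟩ := pv_maxD_spec (G.keys.map (fun k => k.1)) hmapne1
  obtain ⟨hAny_mem, hAny_min⟩ := pv_minD_spec (G.keys.map (fun k => k.2)) hmapne2
  obtain ⟨hAxy_mem, hAxy_max⟩ := pv_maxD_spec (G.keys.map (fun k => k.2)) hmapne2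
  have he1 : (PySem.List.min? (G.keys.map (fun k => k.1)) (fun v => v)).getD 0 = nx :=
    pv_min_eq hmemmap1 hAnx_mem hAnx_min hnx_mem hnx_min
  have he2 : (PySem.List.max? (G.keys.map (fun k => k.1)) (fun v => v)).getD 0 = xx :=
    pv_max_eq hmemmap1 hAxx_mem hAxx_max hxx_mem hxx_max
  have he3 : (PySem.List.min? (G.keys.map (fun k => k.2)) (fun v => v)).getD 0 = ny :=
    pv_min_eq hmemmap2 hAny_mem hAny_min hny_mem hny_min
  have he4 : (PySem.List.max? (G.keys.map (fun k => k.2)) (fun v => v)).getD 0 = xy :=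
    pv_max_eq hmemmap2 hAxy_mem hAxy_max hxy_mem hxy_max
  -- size of the grid, and the per-cell bound facts
  have hnxxx : nx ≤ xx := hxx_max nx hnx_mem
  have hnyxy : ny ≤ xy := hxy_max ny hny_mem
  set W := (xx + 1 - nx).toNat with hW
  set H := (xy + 1 - ny).toNat with hH
  have hWc : (W : Int) = xx + 1 - nx := Int.toNat_of_nonneg (by omega)
  have hHc : (H : Int) = xy + 1 - ny := Int.toNat_of_nonneg (by omega)
  have hbndT : ∀ r ∈ pvTrail ins (0, 0),
      0 ≤ r.1 - nx ∧ r.1 - nx < (W : Int) ∧ 0 ≤ r.2 - ny ∧ r.2 - ny < (H : Int) := by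
    intro r hr
    have h1 := hnx_min r.1 (List.mem_map_of_mem hr)
    have h2 := hxx_max r.1 (List.mem_map_of_mem hr)
    have h3 := hny_min r.2 (List.mem_map_of_mem hr)
    have h4 := hxy_max r.2 (List.mem_map_of_mem hr)
    omega
  have hbndK : ∀ r ∈ G.keys,
      0 ≤ r.1 - nx ∧ r.1 - nx < (W : Int) ∧ 0 ≤ r.2 - ny ∧ r.2 - ny < (H : Int) :=
    fun r hr => hbndT r ((hmemk r).mp hr)
  -- evaluate port A
  have hA : construct_dig_site ins
      = pvGrid nx ny H W (fun r => decide (r ∈ G.keys) || false) := by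
    unfold construct_dig_site
    rw [pv_A_fold]
    dsimp only
    rw [← hG, he1, he2, he3, he4]
    have hrep : (PySem.List.pyRange ny (xy + 1) 1).map
        (fun _ => (PySem.List.pyRange nx (xx + 1) 1).map (fun _ => ("." : String)))
        = pvGrid nx ny H W (fun _ => false) := by
      rw [pvGrid_false]
      simp [List.map_const', PySem.List.length_pyRange_one, hW, hH]
    rw [hrep, PySem.Dict.items_eq_map_keys G hnod "#", List.foldl_map]
    rw [PySem.List.foldl_congr_mem _ _ (fun rep k => pvMark nx ny rep k) _ ?_]
    · exact pv_foldl_mark nx ny H W G.keys _ hbndK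
    · intro acc k hk
      simp only [pvMark, hgetD k]
  -- evaluate port B
  have hB : construct_dig_site_alt ins
      = pvGrid nx ny H W (fun r => decide (r ∈ pvTrail ins (0, 0)) || false) := by
    unfold construct_dig_site_alt
    rw [pv_B1_fold]
    dsimp only
    rw [hBB]
    dsimp only
    rw [pv_B2_fold]
    dsimp only
    have hrows : (PySem.List.pyRange 0 (xy - ny + 1) 1).map
        (fun _ => PySem.List.pyRepeat ["."] (xx - nx + 1))
        = pvGrid nx ny H W (fun _ => false) := by
      rw [pvGrid_false]
      simp only [PySem.List.pyRepeat_singleton, List.map_const',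
        PySem.List.length_pyRange_one]
      congr 1
      · omega
      · congr 1
        omega
    rw [hrows]
    exact pv_foldl_mark nx ny H W _ _ hbndT
  rw [hA, hB]
  refine pvGrid_congr ?_
  intro r
  simp [hmemk r]
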